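-- pv_equiv track=rewrite | github.com/martingiguere/hakko-203-firmware-video | fix_byte_agreement.py | generate_confusion_alternatives
-- ===== SOURCE A (Python) =====
-- from itertools import combinations, product
--
-- CONFUSION_MAP = {
--     'A': ['8', '4'],
--     'B': ['8'],
--     'C': ['0', '6', 'D'],
--     'D': ['0', 'C', '8'],
--     'E': ['8', '6'],
--     'F': ['5', '7'],
--     '0': ['C', 'D', '8'],
--     '1': ['7'],
--     '2': [],
--     '3': [],
--     '4': ['A', '9'],
--     '5': ['F'],
--     '6': ['8', 'E'],
--     '7': ['F', '9', '1'],
--     '8': ['A', 'B', '6', 'E', '0', 'D'],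
--     '9': ['4', '7'],
-- }
--
-- def generate_confusion_alternatives(addr, num_digits):
--     """Generate addresses reachable by exactly num_digits OCR confusion substitutions.
--
--     Substitutes digits at positions 0-3 (position 4 is always '0' since
--     addresses are 0x10-aligned). Returns a set excluding the original.
--     """
--     positions = range(4)
--     alternatives = set()
--     for pos_combo in combinations(positions, num_digits):
--         alt_lists = []
--         for p in pos_combo:
--             digit = addr[p].upper()
--             alts = CONFUSION_MAP.get(digit, [])
--             if not alts:
--                 break
--             alt_lists.append((p, alts))
--         else:
--             if len(alt_lists) == num_digits:
--                 for combo in product(*(a for _, a in alt_lists)):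
--                     new_addr = list(addr)
--                     for (p, _), alt_digit in zip(alt_lists, combo):
--                         new_addr[p] = alt_digit
--                     alternatives.add(''.join(new_addr))
--     alternatives.discard(addr)
--     return alternatives
-- ===== SOURCE B (Python) =====
-- CONFUSION_MAP = {
--     'A': ['8', '4'],
--     'B': ['8'],
--     'C': ['0', '6', 'D'],
--     'D': ['0', 'C', '8'],
--     'E': ['8', '6'],
--     'F': ['5', '7'],
--     '0': ['C', 'D', '8'],
--     '1': ['7'],
--     '2': [],
--     '3': [],
--     '4': ['A', '9'],
--     '5': ['F'],
--     '6': ['8', 'E'],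
--     '7': ['F', '9', '1'],
--     '8': ['A', 'B', '6', 'E', '0', 'D'],
--     '9': ['4', '7'],
-- }
--
--
-- def _variant_groups(addr, p, k):
--     """Suffix variants of addr[p:] with exactly k substitutions at positions p..3.
--
--     Returns one group per size-k combination of substituted positions; a
--     position with no alternatives simply contributes an empty group.
--     """
--     if k == 0:
--         return [[addr[p:]]]
--     if p >= 4:
--         return []
--     alts = CONFUSION_MAP.get(addr[p].upper(), [])
--     here = [[a + s for a in alts for s in g]
--             for g in _variant_groups(addr, p + 1, k - 1)]
--     rest = [[addr[p] + s for s in g]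
--             for g in _variant_groups(addr, p + 1, k)]
--     return here + rest
--
--
-- def generate_confusion_alternatives(addr, num_digits):
--     """Addresses reachable by exactly num_digits OCR confusions at positions 0-3.
--
--     Recursive take-or-substitute decomposition over the positions instead of
--     enumerating combinations and products explicitly.
--     """
--     if num_digits < 0:
--         raise ValueError("num_digits must be non-negative")
--     if num_digits > 4:
--         return set()
--     result = set(s for g in _variant_groups(addr, 0, num_digits) for s in g)
--     result.discard(addr)
--     return result
-- ===== Notes on version B (the rewrite author's own statement) =====
-- stated objective: alternative
-- what changed: Replaces itertools.combinations+product with an explicit per-combo build-and-break loop by a recursive take-or-substitute decomposition over the positions that returns one suffix-variant group per position combination, flattened into the result set.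
-- outside the precondition, e.g. on generate_confusion_alternatives('222', 2): A returns set(), B raises IndexError; on generate_confusion_alternatives('22', 3): A returns set(), B raises IndexError
import Mathlib
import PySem

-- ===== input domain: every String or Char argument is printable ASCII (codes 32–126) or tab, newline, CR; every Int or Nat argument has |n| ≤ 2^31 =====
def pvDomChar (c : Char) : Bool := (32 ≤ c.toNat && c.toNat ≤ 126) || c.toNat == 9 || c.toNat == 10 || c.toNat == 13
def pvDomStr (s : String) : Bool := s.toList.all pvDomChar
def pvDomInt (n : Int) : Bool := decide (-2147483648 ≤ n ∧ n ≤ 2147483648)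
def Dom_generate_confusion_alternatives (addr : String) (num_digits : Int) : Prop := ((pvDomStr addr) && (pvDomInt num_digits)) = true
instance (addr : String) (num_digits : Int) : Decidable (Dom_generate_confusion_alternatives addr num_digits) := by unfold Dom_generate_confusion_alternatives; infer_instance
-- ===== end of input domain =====

-- B replaces the explicit combinations+product enumeration by a recursive take-or-substitute
-- decomposition over the four positions (objective: alternative, same cost).

-- ===== PORT A =====
-- the module constant CONFUSION_MAP (shared by both Pythons)
def pvConfMap : PySem.Dict Char (List Char) :=
  PySem.Dict.ofList
    [('A', ['8', '4']), ('B', ['8']), ('C', ['0', '6', 'D']), ('D', ['0', 'C', '8']),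
     ('E', ['8', '6']), ('F', ['5', '7']), ('0', ['C', 'D', '8']), ('1', ['7']),
     ('2', []), ('3', []), ('4', ['A', '9']), ('5', ['F']), ('6', ['8', 'E']),
     ('7', ['F', '9', '1']), ('8', ['A', 'B', '6', 'E', '0', 'D']), ('9', ['4', '7'])]

-- CONFUSION_MAP.get(addr[p].upper(), [])  (appears verbatim in both Pythons)
def pvConfAlts (cs : List Char) (p : Nat) : List Char :=
  pvConfMap.getD (PySem.Chars.upperChar (PySem.List.pyGetD cs (p : Int) ' ')) []

-- itertools.combinations(pool, r) for a list pool, lexicographic order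
def pvCombs : List Nat → Nat → List (List Nat)
  | _, 0 => [[]]
  | [], _ + 1 => []
  | x :: xs, k + 1 => (pvCombs xs k).map (fun c => x :: c) ++ pvCombs xs (k + 1)

-- the inner 'for p in pos_combo: … break … else' loop; none = break occurred
def pvBuildAlts (cs : List Char) : List Nat → Option (List (Nat × List Char))
  | [] => some []
  | p :: ps =>
    let alts := pvConfAlts cs p
    if alts = [] then none
    else (pvBuildAlts cs ps).map (fun r => (p, alts) :: r)

-- itertools.product(*lists)
def pvProduct : List (List Char) → List (List Char)
  | [] => [[]]
  | l :: ls => l.flatMap (fun x => (pvProduct ls).map (fun r => x :: r))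

-- body of A's outer loop
def pvStepA (cs : List Char) (s : List String) (combo : List Nat) : List String :=
  match pvBuildAlts cs combo with
  | none => s
  | some pairs =>
      (pvProduct (pairs.map Prod.snd)).foldl
        (fun s choice =>
          PySem.Set.add s (String.mk
            ((pairs.zip choice).foldl
              (fun acc pc => PySem.List.pySetD acc (pc.1.1 : Int) pc.2) cs)))
        s

def generate_confusion_alternatives (addr : String) (num_digits : Int) : List String :=
  PySem.Set.discard
    ((pvCombs [0, 1, 2, 3] num_digits.toNat).foldl (pvStepA addr.toList) PySem.Set.empty)
    addr

-- ===== PORT B =====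
-- _variant_groups(addr, p, k): one group of suffix variants of addr[p:] per size-k combination
-- of substituted positions ≥ p.  addr[p:] for 0 ≤ p is cs.drop p (exact); addr[p] is
-- pyGetD (in range under Pre_); 'a + s' on a one-char string a is cons.
def pvGroups (cs : List Char) (p : Nat) (k : Nat) : List (List (List Char)) :=
  match k with
  | 0 => [[cs.drop p]]
  | k' + 1 =>
    if 4 ≤ p then []
    else
      let alts := pvConfAlts cs p
      (pvGroups cs (p + 1) k').map (fun g => alts.flatMap (fun a => g.map (fun s => a :: s)))
      ++ (pvGroups cs (p + 1) (k' + 1)).map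
           (fun g => g.map (fun s => PySem.List.pyGetD cs (p : Int) ' ' :: s))
  termination_by 4 - p
  decreasing_by all_goals omega

def generate_confusion_alternatives_alt (addr : String) (num_digits : Int) : List String :=
  if num_digits < 0 then []        -- Python B raises ValueError here (outside Pre_)
  else if 4 < num_digits then []
  else
    PySem.Set.discard
      (PySem.Set.ofList
        (((pvGroups addr.toList 0 num_digits.toNat).flatten).map String.mk))
      addr

-- ===== PRECONDITION & SPEC =====
-- Pre_ excludes num_digits < 0 (A raises ValueError via combinations) and addresses shorter
-- than 4 characters when 1 ≤ num_digits ≤ 4: there A usually raises IndexError, and on the few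
-- such inputs where A's lazy break happens to skip every out-of-range index and return an
-- empty set, B (whose recursion reads every position 0-3) raises IndexError.
def Pre_generate_confusion_alternatives (addr : String) (num_digits : Int) : Prop :=
  0 ≤ num_digits ∧ (4 ≤ addr.toList.length ∨ num_digits = 0 ∨ 5 ≤ num_digits)
instance (addr : String) (num_digits : Int) : Decidable (Pre_generate_confusion_alternatives addr num_digits) := by unfold Pre_generate_confusion_alternatives; infer_instance
def pvWitness_generate_confusion_alternatives : String × Int := ("17A0", 2)

def Spec_generate_confusion_alternatives (addr : String) (num_digits : Int) (out : List String) : Prop := out = generate_confusion_alternatives_alt addr num_digits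
instance (addr : String) (num_digits : Int) (out : List String) : Decidable (Spec_generate_confusion_alternatives addr num_digits out) := by unfold Spec_generate_confusion_alternatives; infer_instance

-- ===== CLAIM (what is proved, stated in full; the proofs are below) =====
def Claim_equal_generate_confusion_alternatives : Prop := ∀ (addr : String) (num_digits : Int), Dom_generate_confusion_alternatives addr num_digits → Pre_generate_confusion_alternatives addr num_digits → Spec_generate_confusion_alternatives addr num_digits (generate_confusion_alternatives addr num_digits)

-- ===== LEMMAS AND PROOFS =====

-- apply the substitutions of a combo/choice pair, right to left
def pvApplyR (cs : List Char) : List Nat → List Char → List Char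
  | [], _ => cs
  | _ :: _, [] => cs
  | p :: ps, x :: xs => (pvApplyR cs ps xs).set p x

-- the sequence of variant char-lists A's loop body emits for one combo
def pvEmis (cs : List Char) (ps : List Nat) : List (List Char) :=
  (pvProduct (ps.map (pvConfAlts cs))).map (pvApplyR cs ps)

theorem pvCombs_big : ∀ (l : List Nat) (k : Nat), l.length < k → pvCombs l k = [] := by
  intro l
  induction l with
  | nil => intro k hk; cases k with | zero => omega | succ k => rfl
  | cons x xs ih =>
    intro k hk
    cases k with
    | zero => omega
    | succ k =>
      simp only [List.length_cons] at hk
      simp [pvCombs, ih k (by omega), ih (k + 1) (by omega)]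

theorem pvCombs_sublist : ∀ (l : List Nat) (k : Nat) (c : List Nat),
    c ∈ pvCombs l k → c.Sublist l := by
  intro l
  induction l with
  | nil =>
    intro k c hc
    cases k with
    | zero => simp [pvCombs] at hc; simp [hc]
    | succ k => simp [pvCombs] at hc
  | cons x xs ih =>
    intro k c hc
    cases k with
    | zero => simp [pvCombs] at hc; simp [hc]
    | succ k =>
      simp only [pvCombs, List.mem_append, List.mem_map] at hc
      rcases hc with ⟨c', hc', rfl⟩ | hc
      · exact List.Sublist.cons₂ x (ih k c' hc')
      · exact List.Sublist.cons x (ih (k + 1) c hc)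

theorem pvApplyR_set_out (q : Nat) (x : Char) :
    ∀ (ps : List Nat) (xs : List Char) (cs : List Char), q ∉ ps →
      pvApplyR (cs.set q x) ps xs = (pvApplyR cs ps xs).set q x := by
  intro ps
  induction ps with
  | nil => intro xs cs _; simp [pvApplyR]
  | cons p ps ih =>
    intro xs cs hq
    cases xs with
    | nil => simp [pvApplyR]
    | cons y ys =>
      have hqp : q ≠ p := fun h => hq (by simp [h])
      have hqps : q ∉ ps := fun h => hq (by simp [h])
      simp only [pvApplyR, ih ys cs hqps]
      exact List.set_comm _ _ hqp

theorem pvFoldA : ∀ (ps : List Nat) (xs : List Char) (cs : List Char), ps.Nodup →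
    (ps.zip xs).foldl (fun acc pc => acc.set pc.1 pc.2) cs = pvApplyR cs ps xs := by
  intro ps
  induction ps with
  | nil => intro xs cs _; simp [pvApplyR]
  | cons p ps ih =>
    intro xs cs hnd
    cases xs with
    | nil => simp [pvApplyR]
    | cons y ys =>
      have hpn : p ∉ ps := (List.nodup_cons.1 hnd).1
      have hnd' : ps.Nodup := (List.nodup_cons.1 hnd).2
      rw [List.zip_cons_cons, List.foldl_cons]
      simp only []
      rw [ih ys (cs.set p y) hnd']
      simp only [pvApplyR]
      exact pvApplyR_set_out p y ps ys cs hpn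

theorem pvBuild_some (cs : List Char) : ∀ ps, (∀ p ∈ ps, pvConfAlts cs p ≠ []) →
    pvBuildAlts cs ps = some (ps.map (fun p => (p, pvConfAlts cs p))) := by
  intro ps
  induction ps with
  | nil => intro _; rfl
  | cons p ps ih =>
    intro h
    simp only [pvBuildAlts]
    rw [if_neg (h p (by simp)), ih (fun q hq => h q (by simp [hq]))]
    rfl

theorem pvBuild_none (cs : List Char) : ∀ ps, (∃ p ∈ ps, pvConfAlts cs p = []) →
    pvBuildAlts cs ps = none := by
  intro ps
  induction ps with
  | nil => intro h; simp at h
  | cons p ps ih =>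
    intro h
    simp only [pvBuildAlts]
    by_cases hp : pvConfAlts cs p = []
    · rw [if_pos hp]
    · rw [if_neg hp]
      have : ∃ q ∈ ps, pvConfAlts cs q = [] := by
        obtain ⟨q, hq, hq0⟩ := h
        rcases List.mem_cons.1 hq with rfl | hq'
        · exact absurd hq0 hp
        · exact ⟨q, hq', hq0⟩
      rw [ih this]
      rfl

theorem pvProduct_of_mem_nil : ∀ (ls : List (List Char)), [] ∈ ls → pvProduct ls = [] := by
  intro ls
  induction ls with
  | nil => intro h; simp at h
  | cons l t ih =>
    intro h
    rcases List.mem_cons.1 h with rfl | h'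
    · rfl
    · simp [pvProduct, ih h']

-- one step of A's outer loop emits exactly pvEmis
theorem pvStepA_emis (cs : List Char) (s : List String) (ps : List Nat) (hnd : ps.Nodup) :
    pvStepA cs s ps = ((pvEmis cs ps).map String.mk).foldl PySem.Set.add s := by
  by_cases hne : ∀ p ∈ ps, pvConfAlts cs p ≠ []
  · unfold pvStepA
    rw [pvBuild_some cs ps hne]
    simp only [List.map_map]
    have hsnd : (ps.map ((fun x => Prod.snd x) ∘ fun p => (p, pvConfAlts cs p)))
        = ps.map (pvConfAlts cs) := rfl
    rw [hsnd]
    unfold pvEmis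
    rw [List.map_map, List.foldl_map]
    congr 1
    funext s' choice
    congr 1
    rw [List.zip_map_left, List.foldl_map]
    simp only [Function.comp, Prod.map, id, PySem.List.pySetD_natCast]
    exact congrArg String.mk (pvFoldA ps choice cs hnd)
  · push_neg at hne
    obtain ⟨p, hp, hp0⟩ := hne
    unfold pvStepA
    rw [pvBuild_none cs ps ⟨p, hp, hp0⟩]
    unfold pvEmis
    rw [pvProduct_of_mem_nil (ps.map (pvConfAlts cs))
        (by exact List.mem_map.2 ⟨p, hp, hp0⟩)]
    rfl

-- A's whole outer loop = one fold of Set.add over the concatenated emissions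
theorem pvFoldA_flat (cs : List Char) : ∀ (combos : List (List Nat)) (s : List String),
    (∀ c ∈ combos, c.Nodup) →
    combos.foldl (pvStepA cs) s
      = ((combos.flatMap (pvEmis cs)).map String.mk).foldl PySem.Set.add s := by
  intro combos
  induction combos with
  | nil => intro s _; rfl
  | cons c t ih =>
    intro s h
    rw [List.foldl_cons, List.flatMap_cons, List.map_append, List.foldl_append,
        ← pvStepA_emis cs s c (h c (by simp))]
    exact ih _ (fun c' hc' => h c' (by simp [hc']))

-- setting position (l1.length) inside l1 ++ x :: l2
theorem pvSet_mid : ∀ (l1 : List Char) (x : Char) (l2 : List Char) (a : Char),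
    (l1 ++ x :: l2).set l1.length a = l1 ++ a :: l2 := by
  intro l1
  induction l1 with
  | nil => intro x l2 a; rfl
  | cons y t ih => intro x l2 a; simp [ih]

-- take (p+1) splits off position p (p < length)
theorem pvTake_succ (cs : List Char) (p : Nat) (hp : p < cs.length) :
    cs.take (p + 1) = cs.take p ++ [cs.getD p ' '] := by
  rw [List.take_succ, List.getElem?_eq_getElem hp, List.getD_eq_getElem _ _ hp]
  rfl

-- MAIN: the groups B's recursion returns, with the untouched prefix re-attached, are
-- exactly A's per-combo emission lists, one group per combination in A's order.
theorem pvGL (cs : List Char) (h4 : 4 ≤ cs.length) :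
    ∀ (n p : Nat), p + n = 4 → ∀ (j : Nat),
      (pvGroups cs p j).map (fun g => g.map (fun s => cs.take p ++ s))
        = (pvCombs (List.range' p n) j).map (pvEmis cs) := by
  intro n
  induction n with
  | zero =>
    intro p hp j
    have hp4 : p = 4 := by omega
    subst hp4
    cases j with
    | zero =>
      simp [pvGroups, pvCombs, pvEmis, pvProduct, pvApplyR, List.take_append_drop]
    | succ j =>
      rw [pvGroups]
      simp [pvCombs]
  | succ n ih =>
    intro p hp j
    have hlt : p < 4 := by omega
    have hplen : p < cs.length := by omega
    cases j with
    | zero =>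
      simp [pvGroups, pvCombs, pvEmis, pvProduct, pvApplyR, List.take_append_drop]
    | succ j =>
      have hrange : List.range' p (n + 1) = p :: List.range' (p + 1) n := by
        simp [List.range'_succ]
      rw [pvGroups, if_neg (by omega : ¬ 4 ≤ p), hrange]
      simp only [pvCombs, List.map_append, List.map_map]
      congr 1
      · -- substitute-here part
        have hset : ∀ (a : Char) (s : List Char),
            cs.take p ++ a :: s = (cs.take (p + 1) ++ s).set p a := by
          intro a s
          rw [pvTake_succ cs p hplen]
          have := pvSet_mid (cs.take p) (cs.getD p ' ') s a
          rw [List.length_take, min_eq_left (le_of_lt hplen)] at this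
          rw [List.append_assoc, List.singleton_append, this]
        have h1 : ∀ g : List (List Char),
            (fun g => (fun g => g.map (fun s => cs.take p ++ s))
              ((fun g => (pvConfAlts cs p).flatMap (fun a => g.map (fun s => a :: s))) g)) g
            = (fun G => (pvConfAlts cs p).flatMap (fun a => G.map (fun t => t.set p a)))
                (g.map (fun s => cs.take (p + 1) ++ s)) := by
          intro g
          simp only [List.map_flatMap, List.map_map]
          refine List.flatMap_congr ?_
          intro a _
          refine List.map_congr_left ?_
          intro s _
          simpa using hset a s
        calc (pvGroups cs (p + 1) j).map
              (fun g => (fun g => g.map (fun s => cs.take p ++ s))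
                ((fun g => (pvConfAlts cs p).flatMap (fun a => g.map (fun s => a :: s))) g))
            = ((pvGroups cs (p + 1) j).map (fun g => g.map (fun s => cs.take (p + 1) ++ s))).map
                (fun G => (pvConfAlts cs p).flatMap (fun a => G.map (fun t => t.set p a))) := by
              rw [List.map_map]
              exact List.map_congr_left (fun g _ => h1 g)
          _ = ((pvCombs (List.range' (p + 1) n) j).map (pvEmis cs)).map
                (fun G => (pvConfAlts cs p).flatMap (fun a => G.map (fun t => t.set p a))) := by
              rw [ih (p + 1) (by omega) j]
          _ = (pvCombs (List.range' (p + 1) n) j).map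
                (fun c => pvEmis cs (p :: c)) := by
              rw [List.map_map]
              refine List.map_congr_left ?_
              intro c _
              simp only [Function.comp]
              unfold pvEmis
              simp only [List.map_cons, pvProduct, List.map_flatMap, List.map_map]
              refine (List.flatMap_congr ?_).symm
              intro a _
              refine List.map_congr_left ?_
              intro ch _
              simp [pvApplyR]
      · -- keep-here part
        have h2 : ∀ g : List (List Char),
            (fun g => (fun g => g.map (fun s => cs.take p ++ s))
              ((fun g => g.map (fun s => PySem.List.pyGetD cs (p : Int) ' ' :: s)) g)) g
            = g.map (fun s => cs.take (p + 1) ++ s) := by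
          intro g
          simp only [List.map_map]
          refine List.map_congr_left ?_
          intro s _
          simp only [Function.comp]
          rw [pvTake_succ cs p hplen, PySem.List.pyGetD_natCast, List.append_assoc,
              List.singleton_append]
        calc (pvGroups cs (p + 1) (j + 1)).map
              (fun g => (fun g => g.map (fun s => cs.take p ++ s))
                ((fun g => g.map (fun s => PySem.List.pyGetD cs (p : Int) ' ' :: s)) g))
            = (pvGroups cs (p + 1) (j + 1)).map (fun g => g.map (fun s => cs.take (p + 1) ++ s)) := by
              exact List.map_congr_left (fun g _ => h2 g)
          _ = (pvCombs (List.range' (p + 1) n) (j + 1)).map (pvEmis cs) := ih (p + 1) (by omega) (j + 1)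

-- ===== VERDICT (by name: the statement is the Claim_ definition above) =====
theorem generate_confusion_alternatives_spec : Claim_equal_generate_confusion_alternatives := by
  intro addr nd _ hpre
  unfold Spec_generate_confusion_alternatives
  unfold generate_confusion_alternatives generate_confusion_alternatives_alt
  rw [if_neg (not_lt.2 hpre.1)]
  by_cases hbig : 4 < nd
  · rw [if_pos hbig]
    rw [pvCombs_big [0, 1, 2, 3] nd.toNat (by simp; omega)]
    rfl
  · rw [if_neg hbig]
    by_cases hlen : 4 ≤ addr.toList.length
    · -- the main case: length ≥ 4
      have hnodup : ∀ c ∈ pvCombs [0, 1, 2, 3] nd.toNat, c.Nodup :=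
        fun c hc => (pvCombs_sublist _ _ c hc).nodup (by decide)
      rw [pvFoldA_flat addr.toList _ PySem.Set.empty hnodup]
      have hgl := pvGL addr.toList hlen 4 0 rfl nd.toNat
      simp only [List.take_zero, List.nil_append, List.map_id'] at hgl
      have h03 : List.range' 0 4 = [0, 1, 2, 3] := by decide
      rw [h03] at hgl
      have hflat : (pvGroups addr.toList 0 nd.toNat).flatten
          = (pvCombs [0, 1, 2, 3] nd.toNat).flatMap (pvEmis addr.toList) := by
        rw [List.flatMap_def, ← hgl]
      rw [hflat]
      rfl
    · -- length < 4: Pre_ forces nd = 0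
      have hnd0 : nd = 0 := by
        rcases hpre.2 with h | h | h
        · omega
        · exact h
        · omega
      subst hnd0
      simp [pvCombs, pvStepA, pvBuildAlts, pvProduct, pvGroups, PySem.Set.ofList]
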